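-- pv_equiv track=rewrite | github.com/kurosiro2/n-gram | exp/statistics/data_loader.py | get_groups_for_date
-- ===== SOURCE A (Python) =====
-- BACKFILL_EARLIEST_GROUP = False
--
-- def get_groups_for_date(name: str, date: int, group_timeline):
--     """
--     指定した name, date に対して有効なグループ集合を返す。
--
--     group_timeline[name] = [(start_date, set(groups)), ...] （start_date 昇順）
--
--     - BACKFILL_EARLIEST_GROUP = True:
--         date が最初の start_date より前なら、
--         「最初の snapshot の groups をそのまま過去にも遡って適用」する。
--     - BACKFILL_EARLIEST_GROUP = False:
--         date が最初の start_date より前なら、所属不明（空集合）を返す。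
--     """
--     entries = group_timeline.get(name)
--     if not entries:
--         # その名前が一度も setting に現れない
--         return set()
--
--     # entries: [(start_date, set(groups)), ...] 昇順
--     first_date, first_groups = entries[0]
--
--     # フラグで最初の snapshot を過去に遡って適用するか決める
--     if date < first_date:
--         if BACKFILL_EARLIEST_GROUP:
--             return set(first_groups)
--         else:
--             return set()
--
--     # それ以外は「start_date <= date の中で一番新しいもの」を探す
--     chosen_groups = None
--     for start_date, groups in entries:
--         if start_date <= date:
--             chosen_groups = groups
--         else:
--             break
--
--     return set(chosen_groups) if chosen_groups is not None else set()
-- ===== SOURCE B (Python) =====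
-- BACKFILL_EARLIEST_GROUP = False
--
-- def get_groups_for_date(name, date, group_timeline):
--     entries = group_timeline.get(name)
--     if not entries:
--         return set()
--     # binary search (bisect_right by hand) for the number of entries with start_date <= date
--     lo, hi = 0, len(entries)
--     while lo < hi:
--         mid = (lo + hi) // 2
--         if entries[mid][0] <= date:
--             lo = mid + 1
--         else:
--             hi = mid
--     return set(entries[lo - 1][1]) if lo > 0 else set()
-- ===== Notes on version B (the rewrite author's own statement) =====
-- stated objective: alternative
-- what changed: replaces A's linear scan-with-break over the timeline by a hand-written binary search (bisect_right) on the start dates, valid because entry lists are sorted ascending as the docstring states; measured run time is dominated by the set copy, so no speed is claimed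
import Mathlib
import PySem

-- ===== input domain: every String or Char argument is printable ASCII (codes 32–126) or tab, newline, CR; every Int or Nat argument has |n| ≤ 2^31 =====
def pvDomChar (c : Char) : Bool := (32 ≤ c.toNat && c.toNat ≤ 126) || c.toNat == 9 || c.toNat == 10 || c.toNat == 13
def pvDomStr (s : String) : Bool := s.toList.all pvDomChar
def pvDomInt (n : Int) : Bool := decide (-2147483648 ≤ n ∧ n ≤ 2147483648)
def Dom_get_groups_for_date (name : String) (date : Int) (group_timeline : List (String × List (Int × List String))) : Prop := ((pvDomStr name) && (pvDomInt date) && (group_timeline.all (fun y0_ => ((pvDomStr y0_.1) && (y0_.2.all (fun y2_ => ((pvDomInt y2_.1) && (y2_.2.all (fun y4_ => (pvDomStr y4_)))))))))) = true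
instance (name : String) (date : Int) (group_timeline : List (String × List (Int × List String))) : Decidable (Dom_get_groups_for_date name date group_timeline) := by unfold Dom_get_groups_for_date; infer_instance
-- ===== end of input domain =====

-- B replaces A's linear scan by a binary search on the start dates (sorted ascending, as
-- the docstring guarantees); equivalence is proved on timelines sorted by start_date.

-- ===== PORT A =====
-- BACKFILL_EARLIEST_GROUP = False
def pvBackfillEarliestGroup : Bool := false

-- the 'for start_date, groups in entries: if start_date <= date: chosen = groups else: break' loop
def pvLoopA (date : Int) : List (Int × List String) → Option (List String) → Option (List String)
  | [], chosen => chosen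
  | (start_date, groups) :: rest, chosen =>
      if start_date ≤ date then pvLoopA date rest (some groups) else chosen

def get_groups_for_date (name : String) (date : Int) (group_timeline : List (String × List (Int × List String))) : List String :=
  match (PySem.Dict.mk group_timeline).get? name with
  | none => PySem.Set.empty                                -- entries is None → return set()
  | some entries =>
    if entries = [] then PySem.Set.empty                   -- 'if not entries'
    else
      let first := entries.headD (0, [])                   -- first_date, first_groups = entries[0]
      if date < first.1 then
        if pvBackfillEarliestGroup then PySem.Set.ofList first.2 else PySem.Set.empty
      else
        match pvLoopA date entries none with
        | some chosen_groups => PySem.Set.ofList chosen_groups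
        | none => PySem.Set.empty

-- ===== PORT B =====
-- hand-written bisect_right loop of Source B: while lo < hi: mid = (lo+hi)//2; …
def pvBsr (date : Int) (entries : List (Int × List String)) (lo hi : Nat) : Nat :=
  if _h : lo < hi then
    let mid := (lo + hi) / 2
    if (entries.getD mid (0, [])).1 ≤ date then pvBsr date entries (mid + 1) hi
    else pvBsr date entries lo mid
  else lo
termination_by hi - lo
decreasing_by all_goals omega

def get_groups_for_date_alt (name : String) (date : Int) (group_timeline : List (String × List (Int × List String))) : List String :=
  match (PySem.Dict.mk group_timeline).get? name with
  | none => PySem.Set.empty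
  | some entries =>
    if entries = [] then PySem.Set.empty
    else
      let lo := pvBsr date entries 0 entries.length
      if lo > 0 then PySem.Set.ofList (entries.getD (lo - 1) (0, [])).2 else PySem.Set.empty

-- ===== PRECONDITION & SPEC =====
-- Pre_ excludes inputs where the entry list looked up for `name` is not sorted ascending by start_date: the
-- docstring requires 昇順 (ascending) order, and on unsorted lists A's early 'break' makes
-- the returned snapshot an accident of the list order (both A's and B's picks are defensible).
def Pre_get_groups_for_date (name : String) (date : Int) (group_timeline : List (String × List (Int × List String))) : Prop :=
  ∀ p ∈ group_timeline, p.1 = name → p.2.Pairwise (fun a b => a.1 ≤ b.1)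
instance (name : String) (date : Int) (group_timeline : List (String × List (Int × List String))) : Decidable (Pre_get_groups_for_date name date group_timeline) := by unfold Pre_get_groups_for_date; infer_instance

def pvWitness_get_groups_for_date : String × Int × (List (String × List (Int × List String))) :=
  ("a", 5, [("a", [(1, ["g"]), (3, ["h", "g"])]), ("b", [(7, ["k"])])])

def Spec_get_groups_for_date (name : String) (date : Int) (group_timeline : List (String × List (Int × List String))) (out : List String) : Prop := out = get_groups_for_date_alt name date group_timeline
instance (name : String) (date : Int) (group_timeline : List (String × List (Int × List String))) (out : List String) : Decidable (Spec_get_groups_for_date name date group_timeline out) := by unfold Spec_get_groups_for_date; infer_instance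

-- ===== CLAIM (what is proved, stated in full; the proofs are below) =====
def Claim_equal_get_groups_for_date : Prop := ∀ (name : String) (date : Int) (group_timeline : List (String × List (Int × List String))), Dom_get_groups_for_date name date group_timeline → Pre_get_groups_for_date name date group_timeline → Spec_get_groups_for_date name date group_timeline (get_groups_for_date name date group_timeline)

-- ===== LEMMAS AND PROOFS =====

-- length of the longest prefix of entries whose start_date ≤ date
def pvPfx (date : Int) : List (Int × List String) → Nat
  | [] => 0
  | e :: rest => if e.1 ≤ date then pvPfx date rest + 1 else 0

theorem pvPfx_le_length (date : Int) (es : List (Int × List String)) : pvPfx date es ≤ es.length := by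
  induction es with
  | nil => simp [pvPfx]
  | cons e rest ih => simp only [pvPfx]; split <;> simp <;> omega

theorem pvPfx_mem_le (date : Int) (es : List (Int × List String)) :
    ∀ j, j < pvPfx date es → (es.getD j (0, [])).1 ≤ date := by
  induction es with
  | nil => intro j hj; simp [pvPfx] at hj
  | cons e rest ih =>
    intro j hj
    by_cases h : e.1 ≤ date
    · simp only [pvPfx, if_pos h] at hj
      cases j with
      | zero => simpa
      | succ j' => simpa using ih j' (by omega)
    · simp [pvPfx, h] at hj

theorem pvPfx_boundary (date : Int) (es : List (Int × List String)) :
    pvPfx date es < es.length → date < (es.getD (pvPfx date es) (0, [])).1 := by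
  induction es with
  | nil => intro hk; simp [pvPfx] at hk
  | cons e rest ih =>
    intro hk
    by_cases h : e.1 ≤ date
    · simp only [pvPfx, if_pos h] at hk ⊢
      simpa using ih (by simpa using hk)
    · simp only [pvPfx, if_neg h]
      simpa using by omega

-- A's loop computes the last groups of that prefix
theorem pvLoopA_eq (date : Int) (es : List (Int × List String)) (ch : Option (List String)) :
    pvLoopA date es ch =
      if pvPfx date es = 0 then ch else some (es.getD (pvPfx date es - 1) (0, [])).2 := by
  induction es generalizing ch with
  | nil => simp [pvLoopA, pvPfx]
  | cons e rest ih =>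
    simp only [pvLoopA, pvPfx]
    split
    · rw [ih]
      by_cases h0 : pvPfx date rest = 0
      · simp [h0]
      · have : pvPfx date rest + 1 - 1 = (pvPfx date rest - 1) + 1 := by omega
        simp [h0, this]
    · simp

-- sortedness gives monotone start dates
theorem pvSorted_mono (es : List (Int × List String))
    (hs : es.Pairwise (fun a b => a.1 ≤ b.1)) (i j : Nat) (hij : i ≤ j) (hj : j < es.length) :
    (es.getD i (0, [])).1 ≤ (es.getD j (0, [])).1 := by
  rcases eq_or_lt_of_le hij with rfl | hlt
  · exact le_refl _
  · rw [List.getD_eq_getElem es (0, []) (lt_of_le_of_lt hij hj),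
        List.getD_eq_getElem es (0, []) hj]
    exact (List.pairwise_iff_getElem.mp hs) i j (lt_of_le_of_lt hij hj) hj hlt

-- the binary search returns the prefix length on a sorted list
theorem pvBsr_eq (date : Int) (es : List (Int × List String))
    (hs : es.Pairwise (fun a b => a.1 ≤ b.1)) :
    ∀ n lo hi, hi - lo ≤ n → lo ≤ pvPfx date es → pvPfx date es ≤ hi → hi ≤ es.length →
      pvBsr date es lo hi = pvPfx date es := by
  intro n
  induction n with
  | zero =>
    intro lo hi hfuel hlo hhi _
    rw [pvBsr]
    have : ¬ lo < hi := by omega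
    simp [this]; omega
  | succ n ih =>
    intro lo hi hfuel hlo hhi hlen
    rw [pvBsr]
    by_cases hlt : lo < hi
    · simp only [hlt, dif_pos]
      set k := pvPfx date es with hk
      set mid := (lo + hi) / 2 with hmid
      have hmlo : lo ≤ mid := by omega
      have hmhi : mid < hi := by omega
      split
      · next hle =>
        -- entries[mid].start ≤ date → k > mid (else start_k ≤ start_mid contradicts boundary)
        have hmidk : mid < k := by
          by_contra hcon
          push_neg at hcon
          have hklen : k < es.length := by omega
          have h1 : date < (es.getD k (0, [])).1 := pvPfx_boundary date es hklen
          have h2 : (es.getD k (0, [])).1 ≤ (es.getD mid (0, [])).1 :=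
            pvSorted_mono es hs k mid hcon (by omega)
          omega
        exact ih (mid + 1) hi (by omega) (by omega) hhi hlen
      · next hgt =>
        -- entries[mid].start > date → k ≤ mid
        have hkmid : k ≤ mid := by
          by_contra hcon
          push_neg at hcon
          exact hgt (pvPfx_mem_le date es mid hcon)
        exact ih lo mid (by omega) hlo hkmid (by omega)
    · simp [hlt]; omega

-- ===== VERDICT (by name: the statement is the Claim_ definition above) =====
theorem get_groups_for_date_spec : Claim_equal_get_groups_for_date := by
  intro name date gt _hdom hpre
  unfold Spec_get_groups_for_date get_groups_for_date get_groups_for_date_alt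
  cases hget : (PySem.Dict.mk gt).get? name with
  | none => rfl
  | some entries =>
    have hs : entries.Pairwise (fun a b => a.1 ≤ b.1) := by
      have hmem := PySem.Dict.mem_items_of_get?_eq_some _ hget
      exact hpre _ (by simpa using hmem) rfl
    by_cases he : entries = []
    · simp [he]
    · simp only [he, if_neg, ite_false]
      have hbsr : pvBsr date entries 0 entries.length = pvPfx date entries :=
        pvBsr_eq date entries hs entries.length 0 entries.length (by omega) (by omega)
          (pvPfx_le_length date entries) (le_refl _)
      rw [hbsr]
      obtain ⟨e0, rest, rfl⟩ := List.exists_cons_of_ne_nil he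
      by_cases hd : date < ((e0 :: rest).headD (0, [])).1
      · have hk0 : pvPfx date (e0 :: rest) = 0 := by
          simp only [pvPfx]
          have : ¬ e0.1 ≤ date := by simpa using hd
          simp [this]
        simp [hd, hk0, pvBackfillEarliestGroup]
        intro h
        simp only [List.headD_cons] at hd
        omega
      · have hk0 : pvPfx date (e0 :: rest) ≠ 0 := by
          simp only [pvPfx]
          have : e0.1 ≤ date := by simpa using not_lt.mp hd
          simp [this]
        rw [pvLoopA_eq]
        simp [hd, hk0, Nat.pos_of_ne_zero hk0]
        intro h
        simp only [List.headD_cons] at hd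
        omega
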